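-- pv_equiv track=rewrite | github.com/huwcbjones/advent_of_code | 2020/day_07.py | calculate_maximum_containers
-- ===== SOURCE A (Python) =====
-- from collections import defaultdict
-- from typing import Dict, Iterable, List, Set
--
-- def create_inverse_map(rules: Dict[str, Dict[str, int]]) -> Dict[str, Set[str]]:
--     bag_map = defaultdict(set)
--     for inner_bag, bag_rules in rules.items():
--         for outer_bag in bag_rules.keys():
--             bag_map[outer_bag].add(inner_bag)
--     return bag_map
--
-- def calculate_maximum_containers(rules: Dict[str, Dict[str, int]], target: str) -> int:
--     bag_map = create_inverse_map(rules)
--     container_bags = set()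
--     targets = [target]
--     while targets:
--         target = targets.pop()
--         new_containers = bag_map[target]
--         container_bags |= new_containers
--         targets.extend(new_containers)
--     return len(container_bags)
-- ===== SOURCE B (Python) =====
-- def calculate_maximum_containers(rules, target):
--     inverse = {}
--     for inner, bag_rules in rules.items():
--         for outer in bag_rules:
--             inverse.setdefault(outer, []).append(inner)
--     seen = {target}
--     stack = [target]
--     while stack:
--         for container in inverse.get(stack.pop(), ()):
--             if container not in seen:
--                 seen.add(container)
--                 stack.append(container)
--     return len(seen) - 1
-- ===== Notes on version B (the rewrite author's own statement) =====
-- stated objective: alternative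
-- what changed: B replaces A's stack loop that re-enqueues every container on every visit (worst-case exponential re-exploration on a DAG, non-termination on cycles) by a single DFS over an inverse adjacency map with a visited set, pushing each bag at most once; on the timing generator's sparse inputs this was not measurably faster.
import Mathlib
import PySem

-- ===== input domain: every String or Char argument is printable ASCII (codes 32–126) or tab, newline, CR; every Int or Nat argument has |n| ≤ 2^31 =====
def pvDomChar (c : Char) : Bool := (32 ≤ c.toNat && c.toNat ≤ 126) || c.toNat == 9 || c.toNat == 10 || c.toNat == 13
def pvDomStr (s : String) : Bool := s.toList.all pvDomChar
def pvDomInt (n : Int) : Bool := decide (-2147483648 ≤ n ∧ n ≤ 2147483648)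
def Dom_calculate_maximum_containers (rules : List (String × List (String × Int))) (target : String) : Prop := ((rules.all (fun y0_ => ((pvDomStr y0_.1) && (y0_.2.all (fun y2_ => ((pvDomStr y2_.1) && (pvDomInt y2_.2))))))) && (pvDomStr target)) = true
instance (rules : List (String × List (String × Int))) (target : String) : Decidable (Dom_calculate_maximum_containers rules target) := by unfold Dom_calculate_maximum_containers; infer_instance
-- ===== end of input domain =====

-- ===== PORT A =====
-- B is a visited-set DFS instead of A's re-enqueue-everything stack loop (each bag pushed at most once).
-- Both ports read the dict argument through pyDictOf (the list→Python-dict conversion of the type convention).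
-- A pops targets from the END of the list and extends with a hash-ordered set; the returned COUNT does not
-- depend on that order (proved via the reachable-set characterisation), so the port keeps the stack head-first.
def pyDictOf (rules : List (String × List (String × Int))) : PySem.Dict String (PySem.Dict String Int) :=
  PySem.Dict.ofList (rules.map (fun p => (p.1, PySem.Dict.ofList p.2)))

-- create_inverse_map: bag_map[outer].add(inner) on a defaultdict(set)
def create_inverse_map_A (d : PySem.Dict String (PySem.Dict String Int)) :
    PySem.Dict String (PySem.Set String) :=
  d.items.foldl
    (fun bm p => p.2.keys.foldl
      (fun bm outer => bm.modify outer PySem.Set.empty (fun s => PySem.Set.add s p.1)) bm)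
    PySem.Dict.empty

-- the while-loop of A, fuelled: under Pre_ the fuel chosen below is proved sufficient, so the
-- fuel-exhaustion arm is never reached on admitted inputs (a totality guard, not an algorithm switch).
-- (bag_map[target] on the defaultdict also inserts an empty set for a missing key; that mutation
-- never affects the returned length, so the port reads with getD.)
def aLoop (bm : PySem.Dict String (PySem.Set String)) :
    Nat → PySem.Set String → List String → Int
  | _, cb, [] => (PySem.Set.len cb : Int)
  | 0, cb, _ :: _ => (PySem.Set.len cb : Int)
  | fuel + 1, cb, t :: rest =>
      let nc := bm.getD t PySem.Set.empty
      aLoop bm fuel (PySem.Set.union cb nc) (nc ++ rest)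

def calculate_maximum_containers (rules : List (String × List (String × Int))) (target : String) : Int :=
  let d := pyDictOf rules
  let bm := create_inverse_map_A d
  aLoop bm ((d.size + 2) ^ (d.size + 2)) PySem.Set.empty [target]

-- ===== PORT B =====
-- inverse.setdefault(outer, []).append(inner)  ==  modify outer [] (· ++ [inner])
def bInv (d : PySem.Dict String (PySem.Dict String Int)) : PySem.Dict String (List String) :=
  d.items.foldl
    (fun inv p => p.2.keys.foldl
      (fun inv outer => inv.modify outer [] (fun l => l ++ [p.1])) inv)
    PySem.Dict.empty

-- elements handed out by the inverse map all live in the flattened value lists (termination measure)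
theorem bInv_getD_mem_flatten {d : PySem.Dict String (List String)} {t c : String}
    (h : c ∈ d.getD t []) : c ∈ d.values.flatten := by
  rw [PySem.Dict.getD_eq_get?_getD] at h
  cases hg : d.get? t with
  | none => rw [hg] at h; simp at h
  | some v =>
      rw [hg] at h
      have hv : v ∈ d.values :=
        List.mem_map_of_mem (PySem.Dict.mem_items_of_get?_eq_some d hg)
      exact List.mem_flatten.mpr ⟨v, hv, h⟩

-- one step of B's inner for-loop
def bStep (p : PySem.Set String × List String) (c : String) : PySem.Set String × List String :=
  if PySem.Set.contains p.1 c then p else (PySem.Set.add p.1 c, c :: p.2)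

-- removing a fresh element from the "unseen" filter shortens it by exactly one
theorem filter_unseen_length (U : List String) (hU : U.Nodup) (S : List String) (c : String)
    (hc : c ∈ U) (hcs : c ∉ S) :
    (U.filter (fun x => !decide (x ∈ S ++ [c]))).length + 1
      = (U.filter (fun x => !decide (x ∈ S))).length := by
  induction U with
  | nil => cases hc
  | cons u U ih =>
      rcases List.nodup_cons.mp hU with ⟨hu, hU'⟩
      rcases List.mem_cons.mp hc with hcu | hcU
      · subst hcu
        have hfilter : U.filter (fun x => !decide (x ∈ S ++ [c])) = U.filter (fun x => !decide (x ∈ S)) := by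
          apply List.filter_congr
          intro x hx
          have hxc : x ≠ c := fun h => hu (h ▸ hx)
          simp [List.mem_append, hxc]
        have h1 : (!decide (c ∈ S ++ [c])) = false := by simp
        have h2 : (!decide (c ∈ S)) = true := by simp [hcs]
        rw [List.filter_cons, List.filter_cons, h1, h2, hfilter]
        simp
      · have huc : u ≠ c := fun h => hu (h ▸ hcU)
        have h3 : (!decide (u ∈ S ++ [c])) = (!decide (u ∈ S)) := by
          simp [List.mem_append, huc]
        have h4 := ih hU' hcU
        rw [List.filter_cons, List.filter_cons, h3]
        cases hb : (!decide (u ∈ S)) <;>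
          simp only [Bool.false_eq_true, if_false, if_true, List.length_cons] <;> omega

theorem bStep_measure (U : List String) (hU : U.Nodup) :
    ∀ (l : List String), (∀ c ∈ l, c ∈ U) → ∀ (seen : PySem.Set String) (rest : List String),
      ((U.filter (fun x => !(PySem.Set.contains (l.foldl bStep (seen, rest)).1 x))).length
        + (l.foldl bStep (seen, rest)).2.length)
      ≤ (U.filter (fun x => !(PySem.Set.contains seen x))).length + rest.length := by
  intro l
  induction l with
  | nil => intro _ seen rest; simp
  | cons c l ih =>
      intro hl seen rest
      have hcU : c ∈ U := hl c (List.mem_cons_self ..)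
      have hl' : ∀ x ∈ l, x ∈ U := fun x hx => hl x (List.mem_cons_of_mem _ hx)
      simp only [List.foldl_cons]
      by_cases hcs : c ∈ seen
      · have : bStep (seen, rest) c = (seen, rest) := by
          simp [bStep, PySem.Set.contains_eq_listContains, hcs]
        rw [this]; exact ih hl' seen rest
      · have : bStep (seen, rest) c = (PySem.Set.add seen c, c :: rest) := by
          simp [bStep, PySem.Set.contains_eq_listContains, hcs]
        rw [this, PySem.Set.add_of_not_mem hcs]
        have h1 := ih hl' (seen ++ [c]) (c :: rest)
        have h2 := filter_unseen_length U hU seen c hcU hcs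
        simp [List.contains_eq_mem] at h1 h2 ⊢
        omega


-- B's while-loop: DFS with a visited set
def bLoop (inv : PySem.Dict String (List String)) (seen : PySem.Set String) (stack : List String) :
    PySem.Set String :=
  match stack with
  | [] => seen
  | t :: rest =>
      let st := (inv.getD t []).foldl bStep (seen, rest)
      bLoop inv st.1 st.2
termination_by ((PySem.List.dedup inv.values.flatten).filter
    (fun x => !(PySem.Set.contains seen x))).length + stack.length
decreasing_by
  have h := bStep_measure (PySem.List.dedup inv.values.flatten) (PySem.List.nodup_dedup _)
    (inv.getD t []) (fun c hc => (PySem.List.mem_dedup _ _).mpr (bInv_getD_mem_flatten hc)) seen rest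
  simp only [PySem.List.dedup_eq_ofList] at h ⊢
  simp at h ⊢
  omega

def calculate_maximum_containers_alt (rules : List (String × List (String × Int))) (target : String) : Int :=
  let d := pyDictOf rules
  let inv := bInv d
  let seen := bLoop inv (PySem.Set.add PySem.Set.empty target) [target]
  (PySem.Set.len seen : Int) - 1

-- ===== PRECONDITION & SPEC =====
-- neutral reachability used only to STATE the precondition: direct containers of t,
-- and the set of bags reachable from x along "is contained in" edges
def nAdj (d : PySem.Dict String (PySem.Dict String Int)) (t : String) : List String :=
  (d.items.filter (fun p => p.2.contains t)).map (·.1)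

-- reachability, stated declaratively: iterate "add all direct containers of the set" a fixed
-- number of times (one more than the number of bags, so the closure is complete)
def pvStep (adj : String → List String) (s : PySem.Set String) : PySem.Set String :=
  PySem.Set.update s (s.flatMap adj)

def pvIter (adj : String → List String) : Nat → PySem.Set String → PySem.Set String
  | 0, s => s
  | k + 1, s => pvIter adj k (pvStep adj s)

def reachStar (rules : List (String × List (String × Int))) (x : String) : PySem.Set String :=
  pvIter (nAdj (pyDictOf rules)) ((pyDictOf rules).size + 2) (PySem.Set.ofList [x])

-- Pre_ excludes exactly the inputs whose bag-containment graph has a cycle among the bags reachable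
-- from target: on those inputs A's stack loop keeps re-adding the cycle and never returns.
def Pre_calculate_maximum_containers (rules : List (String × List (String × Int))) (target : String) : Prop :=
  ∀ y ∈ reachStar rules target, ∀ c ∈ nAdj (pyDictOf rules) y, y ∉ reachStar rules c
instance (rules : List (String × List (String × Int))) (target : String) :
    Decidable (Pre_calculate_maximum_containers rules target) := by
  unfold Pre_calculate_maximum_containers; infer_instance

def pvWitness_calculate_maximum_containers : (List (String × List (String × Int))) × String :=
  ([("a", [("b", 1)]), ("c", [("a", 2), ("b", 1)])], "b")

-- ===== SPEC =====
def Spec_calculate_maximum_containers (rules : List (String × List (String × Int))) (target : String) (out : Int) : Prop := out = calculate_maximum_containers_alt rules target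
instance (rules : List (String × List (String × Int))) (target : String) (out : Int) : Decidable (Spec_calculate_maximum_containers rules target out) := by unfold Spec_calculate_maximum_containers; infer_instance

-- ===== CLAIM (what is proved, stated in full; the proofs are below) =====
def Claim_equal_calculate_maximum_containers : Prop := ∀ (rules : List (String × List (String × Int))) (target : String), Dom_calculate_maximum_containers rules target → Pre_calculate_maximum_containers rules target → Spec_calculate_maximum_containers rules target (calculate_maximum_containers rules target)

-- ===== LEMMAS AND PROOFS =====

-- ---- the graph: Edge adj x y = "y directly contains x"; everything is proved against
-- ---- Relation.ReflTransGen / TransGen of this relation.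

-- ---- the generic visited-set closure nReach (proof-side reference for B's loop) ----
def nStep (univ : List String) (p : PySem.Set String × List String) (c : String) :
    PySem.Set String × List String :=
  if univ.contains c && !(PySem.Set.contains p.1 c) then (PySem.Set.add p.1 c, c :: p.2) else p

theorem nStep_measure (univ : List String) :
    ∀ (l : List String) (seen : PySem.Set String) (rest : List String),
      (((PySem.List.dedup univ).filter
          (fun x => !(PySem.Set.contains (l.foldl (nStep univ) (seen, rest)).1 x))).length
        + (l.foldl (nStep univ) (seen, rest)).2.length)
      ≤ ((PySem.List.dedup univ).filter (fun x => !(PySem.Set.contains seen x))).length + rest.length := by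
  intro l
  induction l with
  | nil => intro seen rest; simp
  | cons c l ih =>
      intro seen rest
      simp only [List.foldl_cons]
      by_cases hcu : c ∈ univ
      · by_cases hcs : c ∈ seen
        · have : nStep univ (seen, rest) c = (seen, rest) := by
            simp [nStep, PySem.Set.contains_eq_listContains, hcs]
          rw [this]; exact ih seen rest
        · have : nStep univ (seen, rest) c = (PySem.Set.add seen c, c :: rest) := by
            simp [nStep, PySem.Set.contains_eq_listContains, List.contains_eq_mem, hcu, hcs]
          rw [this, PySem.Set.add_of_not_mem hcs]
          have hcU : c ∈ PySem.List.dedup univ := (PySem.List.mem_dedup _ _).mpr hcu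
          have h1 := ih (seen ++ [c]) (c :: rest)
          have h2 := filter_unseen_length (PySem.List.dedup univ) (PySem.List.nodup_dedup univ)
            seen c hcU hcs
          simp [List.contains_eq_mem] at h1 h2 ⊢
          omega
      · have : nStep univ (seen, rest) c = (seen, rest) := by
          simp [nStep, List.contains_eq_mem, hcu]
        rw [this]; exact ih seen rest
def nReach (adj : String → List String) (univ : List String)
    (seen : PySem.Set String) (stack : List String) : PySem.Set String :=
  match stack with
  | [] => seen
  | t :: rest =>
      let st := (adj t).foldl (nStep univ) (seen, rest)
      nReach adj univ st.1 st.2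
termination_by ((PySem.List.dedup univ).filter (fun x => !(PySem.Set.contains seen x))).length + stack.length
decreasing_by
  have h := nStep_measure univ (adj t) seen rest
  simp only [PySem.List.dedup_eq_ofList] at h ⊢
  simp at h ⊢
  omega


-- ---- facts about the shared inner fold (nStep) ----
theorem nStep_eq (univ : List String) (seen : PySem.Set String) (rest : List String) (c : String) :
    nStep univ (seen, rest) c
      = if c ∈ univ ∧ c ∉ seen then (seen ++ [c], c :: rest) else (seen, rest) := by
  by_cases hcu : c ∈ univ
  · by_cases hcs : c ∈ seen
    · simp [nStep, PySem.Set.contains_eq_listContains, hcs, hcu]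
    · rw [if_pos ⟨hcu, hcs⟩, ← PySem.Set.add_of_not_mem hcs]
      simp [nStep, PySem.Set.contains_eq_listContains, List.contains_eq_mem, hcu, hcs]
  · simp [nStep, List.contains_eq_mem, hcu]

theorem nStep_fold_fst_mem (univ : List String) (l : List String) :
    ∀ (seen : PySem.Set String) (rest : List String) (x : String),
      (x ∈ (l.foldl (nStep univ) (seen, rest)).1 ↔ x ∈ seen ∨ (x ∈ l ∧ x ∈ univ)) := by
  induction l with
  | nil => intro seen rest x; simp
  | cons c l ih =>
      intro seen rest x
      simp only [List.foldl_cons, nStep_eq]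
      split_ifs with h
      · rw [ih]
        simp only [List.mem_append, List.mem_cons, List.not_mem_nil, or_false]
        constructor
        · rintro ((hx | rfl) | ⟨hxl, hxu⟩)
          · exact Or.inl hx
          · exact Or.inr ⟨Or.inl rfl, h.1⟩
          · exact Or.inr ⟨Or.inr hxl, hxu⟩
        · rintro (hx | ⟨(rfl | hxl), hxu⟩)
          · exact Or.inl (Or.inl hx)
          · exact Or.inl (Or.inr rfl)
          · exact Or.inr ⟨hxl, hxu⟩
      · rw [ih]
        simp only [List.mem_cons]
        constructor
        · rintro (hx | ⟨hxl, hxu⟩)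
          · exact Or.inl hx
          · exact Or.inr ⟨Or.inr hxl, hxu⟩
        · rintro (hx | ⟨(rfl | hxl), hxu⟩)
          · exact Or.inl hx
          · rcases not_and_or.mp h with h1 | h1
            · exact absurd hxu h1
            · exact Or.inl (not_not.mp h1)
          · exact Or.inr ⟨hxl, hxu⟩

theorem nStep_fold_snd_mem (univ : List String) (l : List String) :
    ∀ (seen : PySem.Set String) (rest : List String) (x : String),
      (x ∈ (l.foldl (nStep univ) (seen, rest)).2 ↔
        x ∈ rest ∨ (x ∈ l ∧ x ∈ univ ∧ x ∉ seen)) := by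
  induction l with
  | nil => intro seen rest x; simp
  | cons c l ih =>
      intro seen rest x
      simp only [List.foldl_cons, nStep_eq]
      split_ifs with h
      · rw [ih]
        simp only [List.mem_append, List.mem_cons, List.not_mem_nil, or_false]
        constructor
        · rintro ((rfl | hx) | ⟨hxl, hxu, hxs⟩)
          · exact Or.inr ⟨Or.inl rfl, h.1, h.2⟩
          · exact Or.inl hx
          · exact Or.inr ⟨Or.inr hxl, hxu, fun hs => hxs (Or.inl hs)⟩
        · rintro (hx | ⟨(rfl | hxl), hxu, hxs⟩)
          · exact Or.inl (Or.inr hx)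
          · exact Or.inl (Or.inl rfl)
          · by_cases hxc : x = c
            · exact Or.inl (Or.inl hxc)
            · exact Or.inr ⟨hxl, hxu, fun hs => hs.elim hxs (fun h2 => hxc h2)⟩
      · rw [ih]
        simp only [List.mem_cons]
        constructor
        · rintro (hx | ⟨hxl, hxu, hxs⟩)
          · exact Or.inl hx
          · exact Or.inr ⟨Or.inr hxl, hxu, hxs⟩
        · rintro (hx | ⟨(rfl | hxl), hxu, hxs⟩)
          · exact Or.inl hx
          · exact absurd ⟨hxu, hxs⟩ h
          · exact Or.inr ⟨hxl, hxu, hxs⟩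

theorem nStep_fold_fst_nodup (univ : List String) (l : List String) :
    ∀ (seen : PySem.Set String) (rest : List String), seen.Nodup →
      (l.foldl (nStep univ) (seen, rest)).1.Nodup := by
  induction l with
  | nil => intro seen rest h; simpa using h
  | cons c l ih =>
      intro seen rest h
      simp only [List.foldl_cons, nStep_eq]
      split_ifs with hc
      · exact ih _ _ (by simp [List.nodup_append, h]; exact fun a ha hac => hc.2 (hac ▸ ha))
      · exact ih _ _ h

-- ---- characterisation of the neutral closure nReach ----
theorem nReach_mono (adj : String → List String) (univ : List String)
    (seen : PySem.Set String) (stack : List String) :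
    ∀ y ∈ seen, y ∈ nReach adj univ seen stack := by
  induction seen, stack using nReach.induct (adj := adj) (univ := univ) with
  | case1 seen => intro y hy; rw [nReach]; exact hy
  | case2 seen t rest st ih =>
      intro y hy
      rw [nReach]
      exact ih y ((nStep_fold_fst_mem univ (adj t) seen rest y).mpr (Or.inl hy))

theorem nReach_nodup (adj : String → List String) (univ : List String)
    (seen : PySem.Set String) (stack : List String) (h : seen.Nodup) :
    (nReach adj univ seen stack).Nodup := by
  induction seen, stack using nReach.induct (adj := adj) (univ := univ) with
  | case1 seen => rw [nReach]; exact h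
  | case2 seen t rest st ih => rw [nReach]; exact ih (nStep_fold_fst_nodup univ (adj t) seen rest h)

theorem nReach_sub (adj : String → List String) (univ : List String)
    (seen : PySem.Set String) (stack : List String) :
    ∀ y ∈ nReach adj univ seen stack,
      y ∈ seen ∨ ∃ t ∈ stack, Relation.ReflTransGen (fun a b => b ∈ adj a) t y := by
  induction seen, stack using nReach.induct (adj := adj) (univ := univ) with
  | case1 seen => intro y hy; rw [nReach] at hy; exact Or.inl hy
  | case2 seen t rest st ih =>
      intro y hy
      rw [nReach] at hy
      rcases ih y hy with h1 | ⟨t', ht', h2⟩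
      · rcases (nStep_fold_fst_mem univ (adj t) seen rest y).mp h1 with h2 | ⟨h2, _⟩
        · exact Or.inl h2
        · exact Or.inr ⟨t, List.mem_cons_self .., Relation.ReflTransGen.single h2⟩
      · rcases (nStep_fold_snd_mem univ (adj t) seen rest t').mp ht' with h3 | ⟨h3, _, _⟩
        · exact Or.inr ⟨t', List.mem_cons_of_mem _ h3, h2⟩
        · exact Or.inr ⟨t, List.mem_cons_self .., Relation.ReflTransGen.head h3 h2⟩

theorem nReach_closed (adj : String → List String) (univ : List String)
    (hadj : ∀ t c, c ∈ adj t → c ∈ univ) (seen : PySem.Set String) (stack : List String)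
    (hinv : ∀ x ∈ seen, x ∈ stack ∨ ∀ c ∈ adj x, c ∈ seen) :
    ∀ x ∈ nReach adj univ seen stack, ∀ c ∈ adj x, c ∈ nReach adj univ seen stack := by
  induction seen, stack using nReach.induct (adj := adj) (univ := univ) with
  | case1 seen =>
      intro x hx c hc
      rw [nReach] at hx ⊢
      rcases hinv x hx with h1 | h1
      · cases h1
      · exact h1 c hc
  | case2 seen t rest st ih =>
      rw [nReach]
      apply ih
      intro x hx
      rcases (nStep_fold_fst_mem univ (adj t) seen rest x).mp hx with hxs | ⟨hxa, hxu⟩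
      · rcases hinv x hxs with h1 | h1
        · rcases List.mem_cons.mp h1 with rfl | h2
          · right
            intro c hc
            exact (nStep_fold_fst_mem univ (adj x) seen rest c).mpr
              (Or.inr ⟨hc, hadj x c hc⟩)
          · exact Or.inl ((nStep_fold_snd_mem univ (adj t) seen rest x).mpr (Or.inl h2))
        · right
          intro c hc
          exact (nStep_fold_fst_mem univ (adj t) seen rest c).mpr (Or.inl (h1 c hc))
      · by_cases hxs : x ∈ seen
        · rcases hinv x hxs with h1 | h1
          · rcases List.mem_cons.mp h1 with rfl | h2
            · right
              intro c hc
              exact (nStep_fold_fst_mem univ (adj x) seen rest c).mpr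
                (Or.inr ⟨hc, hadj x c hc⟩)
            · exact Or.inl ((nStep_fold_snd_mem univ (adj t) seen rest x).mpr (Or.inl h2))
          · right
            intro c hc
            exact (nStep_fold_fst_mem univ (adj t) seen rest c).mpr (Or.inl (h1 c hc))
        · exact Or.inl ((nStep_fold_snd_mem univ (adj t) seen rest x).mpr
            (Or.inr ⟨hxa, hxu, hxs⟩))

theorem nReach_spec (adj : String → List String) (univ : List String)
    (hadj : ∀ t c, c ∈ adj t → c ∈ univ) (x y : String) :
    y ∈ nReach adj univ (PySem.Set.add PySem.Set.empty x) [x] ↔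
      Relation.ReflTransGen (fun a b => b ∈ adj a) x y := by
  have hseen : PySem.Set.add PySem.Set.empty x = [x] := rfl
  constructor
  · intro hy
    rcases nReach_sub adj univ _ _ y hy with h1 | ⟨t, ht, h2⟩
    · rw [hseen] at h1
      rcases List.mem_singleton.mp h1 with rfl
      exact Relation.ReflTransGen.refl
    · rcases List.mem_singleton.mp ht with rfl
      exact h2
  · intro h
    have hclosed := nReach_closed adj univ hadj (PySem.Set.add PySem.Set.empty x) [x]
      (by intro z hz; rw [hseen] at hz
          rcases List.mem_singleton.mp hz with rfl
          exact Or.inl (List.mem_singleton.mpr rfl))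
    have hx0 : x ∈ nReach adj univ (PySem.Set.add PySem.Set.empty x) [x] :=
      nReach_mono adj univ _ _ x (by rw [hseen]; exact List.mem_singleton.mpr rfl)
    induction h with
    | refl => exact hx0
    | tail h1 h2 ih => exact hclosed _ ih _ h2

-- ---- B's loop is the neutral closure over its own adjacency map ----
theorem bLoop_eq_nReach (inv : PySem.Dict String (List String)) :
    ∀ (seen : PySem.Set String) (stack : List String),
      bLoop inv seen stack = nReach (fun t => inv.getD t []) inv.values.flatten seen stack := by
  intro seen stack
  induction seen, stack using bLoop.induct (inv := inv) with
  | case1 seen => rw [bLoop, nReach]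
  | case2 seen t rest st ih =>
      have hfold : (inv.getD t []).foldl bStep (seen, rest)
          = (inv.getD t []).foldl (nStep inv.values.flatten) (seen, rest) := by
        apply PySem.List.foldl_congr_mem
        intro acc c hc
        have hcu : c ∈ inv.values.flatten := bInv_getD_mem_flatten hc
        rw [nStep_eq]
        by_cases hcs : c ∈ acc.1
        · simp [bStep, PySem.Set.contains_eq_listContains, hcs]
        · rw [if_pos ⟨hcu, hcs⟩, ← PySem.Set.add_of_not_mem hcs]
          simp [bStep, PySem.Set.contains_eq_listContains, hcs]
      rw [bLoop, nReach, ← hfold]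
      exact ih

-- ---- both ports' inverse maps compute the neutral adjacency nAdj ----
theorem values_of_ofList_foldl {pl : List (String × PySem.Dict String Int)} :
    ∀ (dd : PySem.Dict String (PySem.Dict String Int)) (w : PySem.Dict String Int),
      w ∈ (pl.foldl (fun d p => d.insert p.1 p.2) dd).values → w ∈ dd.values ∨ ∃ p ∈ pl, w = p.2 := by
  induction pl with
  | nil => intro dd w h; exact Or.inl h
  | cons p pl ih =>
      intro dd w h
      rcases ih (dd.insert p.1 p.2) w h with h1 | ⟨q, hq, h2⟩
      · rcases PySem.Dict.mem_values_insert dd p.1 p.2 w h1 with rfl | h2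
        · exact Or.inr ⟨p, List.mem_cons_self .., rfl⟩
        · exact Or.inl h2
      · exact Or.inr ⟨q, List.mem_cons_of_mem _ hq, h2⟩

theorem pyDictOf_inner_nodup {rules : List (String × List (String × Int))}
    {p : String × PySem.Dict String Int} (hp : p ∈ (pyDictOf rules).items) : p.2.keys.Nodup := by
  have hv : p.2 ∈ (pyDictOf rules).values := List.mem_map_of_mem hp
  have h := values_of_ofList_foldl PySem.Dict.empty p.2 hv
  rcases h with h1 | ⟨q, hq, h2⟩
  · simp [PySem.Dict.empty] at h1
  · rcases List.mem_map.mp hq with ⟨r, _, rfl⟩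
    rw [h2]
    exact PySem.Dict.nodup_keys_ofList r.2

theorem bInv_inner (v : String) (keys : List String) (hk : keys.Nodup) :
    ∀ (inv : PySem.Dict String (List String)) (c : String),
      (keys.foldl (fun inv outer => inv.modify outer [] (fun l => l ++ [v])) inv).getD c []
        = if c ∈ keys then inv.getD c [] ++ [v] else inv.getD c [] := by
  induction keys with
  | nil => intro inv c; simp
  | cons o ks ih =>
      rcases List.nodup_cons.mp hk with ⟨ho, hks⟩
      intro inv c
      rw [List.foldl_cons, ih hks]
      by_cases hco : c = o
      · subst hco
        have hcks : c ∉ ks := ho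
        simp [hcks]
      · simp [PySem.Dict.getD_modify, hco, List.mem_cons]

theorem bInv_getD (d : PySem.Dict String (PySem.Dict String Int))
    (hin : ∀ p ∈ d.items, p.2.keys.Nodup) (c : String) :
    (bInv d).getD c [] = nAdj d c := by
  have main : ∀ (items : List (String × PySem.Dict String Int)),
      (∀ p ∈ items, p.2.keys.Nodup) →
      ∀ (inv : PySem.Dict String (List String)),
      (items.foldl (fun inv p => p.2.keys.foldl
          (fun inv outer => inv.modify outer [] (fun l => l ++ [p.1])) inv) inv).getD c []
        = inv.getD c [] ++ (items.filter (fun p => p.2.contains c)).map (·.1) := by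
    intro items
    induction items with
    | nil => intro _ inv; simp
    | cons p items ih =>
        intro hin inv
        rw [List.foldl_cons, ih (fun q hq => hin q (List.mem_cons_of_mem _ hq)),
          bInv_inner p.1 p.2.keys (hin p (List.mem_cons_self ..))]
        by_cases hc : p.2.contains c
        · have hmem : c ∈ p.2.keys := (PySem.Dict.contains_iff_mem_keys p.2 c).mp hc
          simp [hc, hmem]
        · have hmem : c ∉ p.2.keys := fun h =>
            hc ((PySem.Dict.contains_iff_mem_keys p.2 c).mpr h)
          simp [hc, hmem]
  rw [bInv, main d.items hin PySem.Dict.empty]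
  simp [nAdj]

theorem aInv_inner (v : String) (keys : List String) (hk : keys.Nodup) :
    ∀ (bm : PySem.Dict String (PySem.Set String)),
      (∀ o ∈ keys, v ∉ bm.getD o PySem.Set.empty) →
      ∀ (c : String),
      (keys.foldl (fun bm outer => bm.modify outer PySem.Set.empty (fun s => PySem.Set.add s v)) bm).getD c PySem.Set.empty
        = if c ∈ keys then bm.getD c PySem.Set.empty ++ [v] else bm.getD c PySem.Set.empty := by
  induction keys with
  | nil => intro bm _ c; simp
  | cons o ks ih =>
      rcases List.nodup_cons.mp hk with ⟨ho, hks⟩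
      intro bm hfresh c
      have hfresh' : ∀ o' ∈ ks, v ∉ (bm.modify o PySem.Set.empty
          (fun s => PySem.Set.add s v)).getD o' PySem.Set.empty := by
        intro o' ho'
        have hne : o' ≠ o := fun h => ho (h ▸ ho')
        rw [PySem.Dict.getD_modify]
        simp [hne]
        exact hfresh o' (List.mem_cons_of_mem _ ho')
      rw [List.foldl_cons, ih hks _ hfresh']
      have hadd : PySem.Set.add (bm.getD o PySem.Set.empty) v
          = bm.getD o PySem.Set.empty ++ [v] :=
        PySem.Set.add_of_not_mem (hfresh o (List.mem_cons_self ..))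
      by_cases hco : c = o
      · subst hco
        have hcks : c ∉ ks := ho
        simp [hcks]
        exact hadd
      · simp [PySem.Dict.getD_modify, hco, List.mem_cons]

theorem aInv_getD (d : PySem.Dict String (PySem.Dict String Int))
    (hin : ∀ p ∈ d.items, p.2.keys.Nodup) (hout : d.keys.Nodup) (c : String) :
    (create_inverse_map_A d).getD c PySem.Set.empty = nAdj d c := by
  have main : ∀ (items : List (String × PySem.Dict String Int)),
      (∀ p ∈ items, p.2.keys.Nodup) → (items.map (·.1)).Nodup →
      ∀ (bm : PySem.Dict String (PySem.Set String)),
      (∀ p ∈ items, ∀ k, p.1 ∉ bm.getD k PySem.Set.empty) →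
      (items.foldl (fun bm p => p.2.keys.foldl
          (fun bm outer => bm.modify outer PySem.Set.empty (fun s => PySem.Set.add s p.1)) bm) bm).getD c PySem.Set.empty
        = bm.getD c PySem.Set.empty ++ (items.filter (fun p => p.2.contains c)).map (·.1) := by
    intro items
    induction items with
    | nil => intro _ _ bm _; simp
    | cons p items ih =>
        intro hin hnd bm hfresh
        rcases List.nodup_cons.mp hnd with ⟨hp1, hnd'⟩
        have hinner := aInv_inner p.1 p.2.keys (hin p (List.mem_cons_self ..)) bm
          (fun o _ => hfresh p (List.mem_cons_self ..) o)
        have hfresh' : ∀ q ∈ items, ∀ k, q.1 ∉ (p.2.keys.foldl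
            (fun bm outer => bm.modify outer PySem.Set.empty
              (fun s => PySem.Set.add s p.1)) bm).getD k PySem.Set.empty := by
          intro q hq k
          rw [hinner k]
          have h1 : q.1 ∉ bm.getD k PySem.Set.empty := hfresh q (List.mem_cons_of_mem _ hq) k
          have h2 : q.1 ≠ p.1 := by
            intro h
            have hmm : p.1 ∈ items.map (fun x => x.1) := by
              rw [← h]; exact List.mem_map_of_mem hq
            exact hp1 hmm
          split_ifs with h3
          · simp [h2]
            exact h1
          · exact h1
        rw [List.foldl_cons, ih (fun q hq => hin q (List.mem_cons_of_mem _ hq)) hnd' _ hfresh',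
          hinner c]
        by_cases hc : p.2.contains c
        · have hmem : c ∈ p.2.keys := (PySem.Dict.contains_iff_mem_keys p.2 c).mp hc
          simp [hc, hmem]
        · have hmem : c ∉ p.2.keys := fun h =>
            hc ((PySem.Dict.contains_iff_mem_keys p.2 c).mpr h)
          simp [hc, hmem]
  have hfresh0 : ∀ p ∈ d.items, ∀ k,
      p.1 ∉ (PySem.Dict.empty : PySem.Dict String (PySem.Set String)).getD k PySem.Set.empty := by
    intro p _ k
    rw [PySem.Dict.getD_empty]
    simp
  rw [create_inverse_map_A, main d.items hin hout PySem.Dict.empty hfresh0]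
  simp [nAdj]

-- ---- small graph facts ----
theorem nAdj_mem_keys {d : PySem.Dict String (PySem.Dict String Int)} {t c : String}
    (h : c ∈ nAdj d t) : c ∈ d.keys := by
  rcases List.mem_map.mp h with ⟨p, hp, rfl⟩
  exact List.mem_map_of_mem (List.mem_of_mem_filter hp)

theorem nAdj_length_le (d : PySem.Dict String (PySem.Dict String Int)) (t : String) :
    (nAdj d t).length ≤ d.size := by
  rw [nAdj, List.length_map]
  exact List.length_filter_le _ _

theorem transGen_mem_keys {d : PySem.Dict String (PySem.Dict String Int)} {t y : String}
    (h : Relation.TransGen (fun a b => b ∈ nAdj d a) t y) : y ∈ d.keys := by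
  induction h with
  | single h1 => exact nAdj_mem_keys h1
  | tail _ h2 _ => exact nAdj_mem_keys h2

theorem reachPlus_finite (d : PySem.Dict String (PySem.Dict String Int)) (t : String) :
    {y | Relation.TransGen (fun a b => b ∈ nAdj d a) t y}.Finite := by
  exact Set.Finite.subset (List.finite_toSet d.keys) (fun y hy => transGen_mem_keys hy)

-- ---- correctness of the bounded closure pvIter (used by Pre_) ----
theorem pvIter_mono (adj : String → List String) (k : Nat) :
    ∀ s, ∀ y ∈ s, y ∈ pvIter adj k s := by
  induction k with
  | zero => intro s y hy; exact hy
  | succ k ih =>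
      intro s y hy
      exact ih (pvStep adj s) y ((PySem.Set.mem_update s _ y).mpr (Or.inl hy))

theorem pvIter_sound (adj : String → List String) (k : Nat) :
    ∀ s, ∀ y ∈ pvIter adj k s,
      y ∈ s ∨ ∃ t ∈ s, Relation.TransGen (fun a b => b ∈ adj a) t y := by
  induction k with
  | zero => intro s y hy; exact Or.inl hy
  | succ k ih =>
      intro s y hy
      rcases ih (pvStep adj s) y hy with h1 | ⟨t, ht, hT⟩
      · rcases (PySem.Set.mem_update s _ y).mp h1 with h2 | h2
        · exact Or.inl h2
        · rcases List.mem_flatMap.mp h2 with ⟨t, ht, hy2⟩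
          exact Or.inr ⟨t, ht, Relation.TransGen.single hy2⟩
      · rcases (PySem.Set.mem_update s _ t).mp ht with h2 | h2
        · exact Or.inr ⟨t, h2, hT⟩
        · rcases List.mem_flatMap.mp h2 with ⟨t', ht', ht2⟩
          exact Or.inr ⟨t', ht', Relation.TransGen.head ht2 hT⟩

theorem pvIter_nodup (adj : String → List String) (k : Nat) :
    ∀ s, s.Nodup → (pvIter adj k s).Nodup := by
  induction k with
  | zero => intro s h; exact h
  | succ k ih => intro s h; exact ih (pvStep adj s) (PySem.Set.nodup_update s _ h)

theorem pvStep_fix_iter (adj : String → List String) (k : Nat) :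
    ∀ s, pvStep adj s = s → pvIter adj k s = s := by
  induction k with
  | zero => intro s _; rfl
  | succ k ih => intro s h; show pvIter adj k (pvStep adj s) = s; rw [h]; exact ih s h

theorem pvStep_grow (adj : String → List String) (s : PySem.Set String)
    (h : pvStep adj s ≠ s) : s.length + 1 ≤ (pvStep adj s).length := by
  have he : pvStep adj s = s ++ (PySem.Set.ofList (s.flatMap adj)).filter
      (fun y => !(PySem.Set.contains s y)) := PySem.Set.update_eq_append_filter _ _
  rcases hn : (PySem.Set.ofList (s.flatMap adj)).filter (fun y => !(PySem.Set.contains s y)) with _ | ⟨a, l⟩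
  · exact absurd (by rw [he, hn, List.append_nil]) h
  · rw [he, hn]
    simp

theorem pvIter_fix_or_grow (adj : String → List String) (k : Nat) :
    ∀ s, pvStep adj (pvIter adj k s) = pvIter adj k s
      ∨ s.length + k ≤ (pvIter adj k s).length := by
  induction k with
  | zero => intro s; exact Or.inr (by simp [pvIter])
  | succ k ih =>
      intro s
      by_cases hfix : pvStep adj s = s
      · left
        have h1 : pvIter adj (k + 1) s = s := pvStep_fix_iter adj (k + 1) s hfix
        rw [h1, hfix]
      · rcases ih (pvStep adj s) with h1 | h1
        · exact Or.inl h1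
        · right
          have h2 := pvStep_grow adj s hfix
          show s.length + (k + 1) ≤ (pvIter adj k (pvStep adj s)).length
          omega

theorem nodup_length_le_of_subset (l m : List String) (hl : l.Nodup)
    (h : ∀ y ∈ l, y ∈ m) : l.length ≤ m.length := by
  have h1 : l.toFinset ⊆ m.toFinset := by
    intro y hy
    exact List.mem_toFinset.mpr (h y (List.mem_toFinset.mp hy))
  calc l.length = l.toFinset.card := (List.toFinset_card_of_nodup hl).symm
    _ ≤ m.toFinset.card := Finset.card_le_card h1
    _ ≤ m.length := List.toFinset_card_le m

theorem reachStar_closed (rules : List (String × List (String × Int))) (x : String) :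
    ∀ y ∈ reachStar rules x, ∀ c ∈ nAdj (pyDictOf rules) y, c ∈ reachStar rules x := by
  have hsize : (pyDictOf rules).keys.length = (pyDictOf rules).size := by
    simp [PySem.Dict.keys, PySem.Dict.size]
  have hfix : pvStep (nAdj (pyDictOf rules)) (reachStar rules x) = reachStar rules x := by
    rcases pvIter_fix_or_grow (nAdj (pyDictOf rules)) ((pyDictOf rules).size + 2)
        (PySem.Set.ofList [x]) with h1 | h1
    · exact h1
    · exfalso
      have hsub : ∀ y ∈ pvIter (nAdj (pyDictOf rules)) ((pyDictOf rules).size + 2)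
          (PySem.Set.ofList [x]), y ∈ x :: (pyDictOf rules).keys := by
        intro y hy
        rcases pvIter_sound _ _ _ y hy with h2 | ⟨t, _, hT⟩
        · simp at h2
          exact List.mem_cons.mpr (Or.inl h2)
        · exact List.mem_cons.mpr (Or.inr (transGen_mem_keys hT))
      have hlen := nodup_length_le_of_subset _ (x :: (pyDictOf rules).keys)
        (pvIter_nodup _ _ _ (PySem.Set.nodup_ofList [x])) hsub
      have hxlen : (PySem.Set.ofList [x] : List String).length = 1 := rfl
      simp only [List.length_cons] at hlen
      omega
  intro y hy c hc
  have : c ∈ (reachStar rules x).flatMap (nAdj (pyDictOf rules)) :=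
    List.mem_flatMap.mpr ⟨y, hy, hc⟩
  have h2 : c ∈ pvStep (nAdj (pyDictOf rules)) (reachStar rules x) :=
    (PySem.Set.mem_update _ _ c).mpr (Or.inr this)
  rw [hfix] at h2
  exact h2

theorem reachStar_iff (rules : List (String × List (String × Int))) (x y : String) :
    y ∈ reachStar rules x ↔
      Relation.ReflTransGen (fun a b => b ∈ nAdj (pyDictOf rules) a) x y := by
  constructor
  · intro hy
    rcases pvIter_sound _ _ _ y hy with h1 | ⟨t, ht, hT⟩
    · simp at h1
      exact h1 ▸ Relation.ReflTransGen.refl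
    · simp at ht
      exact ht ▸ hT.to_reflTransGen
  · intro h
    induction h with
    | refl => exact pvIter_mono _ _ _ x (by simp)
    | tail _ h2 ih => exact reachStar_closed rules x _ ih _ h2

noncomputable def rnk (d : PySem.Dict String (PySem.Dict String Int)) (t : String) : Nat :=
  {y | Relation.TransGen (fun a b => b ∈ nAdj d a) t y}.ncard

theorem rnk_le (d : PySem.Dict String (PySem.Dict String Int)) (t : String) :
    rnk d t ≤ d.size := by
  have h1 : rnk d t ≤ ({y | y ∈ d.keys} : Set String).ncard :=
    Set.ncard_le_ncard (fun y hy => transGen_mem_keys hy) (List.finite_toSet d.keys)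
  have h2 : ({y | y ∈ d.keys} : Set String).ncard ≤ d.keys.length := by
    rw [← List.coe_toFinset, Set.ncard_coe_finset]
    exact List.toFinset_card_le d.keys
  have h3 : d.keys.length = d.size := by
    simp [PySem.Dict.keys, PySem.Dict.size]
  omega

theorem rnk_lt_of_edge {d : PySem.Dict String (PySem.Dict String Int)} {t c : String}
    (hedge : c ∈ nAdj d t) (hacyc : ¬ Relation.TransGen (fun a b => b ∈ nAdj d a) c c) :
    rnk d c < rnk d t := by
  apply Set.ncard_lt_ncard _ (reachPlus_finite d t)
  constructor
  · intro y hy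
    exact Relation.TransGen.head hedge hy
  · intro hsub
    exact hacyc (hsub (Relation.TransGen.single hedge))

theorem len_eq_ncard (l : List String) (h : l.Nodup) :
    l.length = ({y | y ∈ l} : Set String).ncard := by
  rw [← List.coe_toFinset, Set.ncard_coe_finset, List.toFinset_card_of_nodup h]

-- ---- the fuelled loop of A computes the cardinality of the reachable set ----
theorem aLoop_spec (d : PySem.Dict String (PySem.Dict String Int))
    (hA : ∀ t, (create_inverse_map_A d).getD t PySem.Set.empty = nAdj d t)
    (target : String)
    (hacyc : ∀ y, Relation.ReflTransGen (fun a b => b ∈ nAdj d a) target y →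
      ¬ Relation.TransGen (fun a b => b ∈ nAdj d a) y y) :
    ∀ (fuel : Nat) (cb : PySem.Set String) (targets : List String),
      cb.Nodup →
      (∀ t ∈ targets, Relation.ReflTransGen (fun a b => b ∈ nAdj d a) target t) →
      (targets.map (fun t => (d.size + 2) ^ (rnk d t))).sum < fuel →
      aLoop (create_inverse_map_A d) fuel cb targets
        = ((({y | y ∈ cb} ∪ {y | ∃ t ∈ targets, Relation.TransGen (fun a b => b ∈ nAdj d a) t y} : Set String)).ncard : Int) := by
  intro fuel
  induction fuel with
  | zero =>
      intro cb targets hnd hre hmu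
      exact absurd hmu (Nat.not_lt_zero _)
  | succ fuel ih =>
      intro cb targets hnd hre hmu
      match targets with
      | [] =>
          rw [aLoop]
          have : ({y | ∃ t ∈ ([] : List String), Relation.TransGen (fun a b => b ∈ nAdj d a) t y} : Set String) = ∅ := by
            ext y; simp
          rw [this, Set.union_empty, ← len_eq_ncard cb hnd]
          rfl
      | t :: rest =>
          rw [aLoop]
          have hedge' : ∀ c ∈ nAdj d t, c ∈ (create_inverse_map_A d).getD t PySem.Set.empty := by
            rw [hA t]; intro c hc; exact hc
          set nc := (create_inverse_map_A d).getD t PySem.Set.empty with hnc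
          have hncadj : nc = nAdj d t := hA t
          -- hypotheses for the induction step
          have hnd' : (PySem.Set.union cb nc).Nodup := PySem.Set.nodup_union cb nc hnd
          have hre' : ∀ t' ∈ nc ++ rest, Relation.ReflTransGen (fun a b => b ∈ nAdj d a) target t' := by
            intro t' ht'
            rcases List.mem_append.mp ht' with h1 | h1
            · exact (hre t (List.mem_cons_self ..)).tail (hncadj ▸ h1)
            · exact hre t' (List.mem_cons_of_mem _ h1)
          -- the measure strictly decreases
          have hsum : ((nc.map (fun t => (d.size + 2) ^ (rnk d t))).sum)
              < (d.size + 2) ^ (rnk d t) := by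
            rcases List.eq_nil_or_concat nc with hnil | ⟨_, _, hcons⟩
            · rw [hnil]
              simp only [List.map_nil, List.sum_nil]
              exact Nat.pow_pos (by omega)
            · have hne : nc ≠ [] := by rw [hcons]; simp
              rcases List.exists_mem_of_ne_nil nc hne with ⟨c0, hc0⟩
              have hrt : 1 ≤ rnk d t := by
                have : c0 ∈ {y | Relation.TransGen (fun a b => b ∈ nAdj d a) t y} :=
                  Relation.TransGen.single (hncadj ▸ hc0)
                have hpos : 0 < rnk d t :=
                  (Set.ncard_pos (reachPlus_finite d t)).mpr ⟨c0, this⟩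
                omega
              have hbound : ∀ x ∈ nc.map (fun t => (d.size + 2) ^ (rnk d t)),
                  x ≤ (d.size + 2) ^ (rnk d t - 1) := by
                intro x hx
                rcases List.mem_map.mp hx with ⟨c, hc, rfl⟩
                have hRc : Relation.ReflTransGen (fun a b => b ∈ nAdj d a) target c :=
                  (hre t (List.mem_cons_self ..)).tail (hncadj ▸ hc)
                have hlt : rnk d c < rnk d t :=
                  rnk_lt_of_edge (hncadj ▸ hc) (hacyc c hRc)
                exact Nat.pow_le_pow_right (by omega) (by omega)
              have hlen : nc.length ≤ d.size := by rw [hncadj]; exact nAdj_length_le d t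
              have h1 : ((nc.map (fun t => (d.size + 2) ^ (rnk d t))).sum)
                  ≤ nc.length * (d.size + 2) ^ (rnk d t - 1) := by
                have := List.sum_le_card_nsmul (nc.map (fun t => (d.size + 2) ^ (rnk d t)))
                  ((d.size + 2) ^ (rnk d t - 1)) hbound
                simpa [smul_eq_mul] using this
              have h2 : nc.length * (d.size + 2) ^ (rnk d t - 1)
                  < (d.size + 2) * (d.size + 2) ^ (rnk d t - 1) := by
                exact (Nat.mul_lt_mul_right (Nat.pow_pos (show 0 < d.size + 2 by omega))).mpr (by omega)
              have h3 : (d.size + 2) * (d.size + 2) ^ (rnk d t - 1) = (d.size + 2) ^ (rnk d t) := by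
                rw [← Nat.pow_succ']
                congr 1
                omega
              omega
          have hmu' : ((nc ++ rest).map (fun t => (d.size + 2) ^ (rnk d t))).sum < fuel := by
            rw [List.map_append, List.sum_append]
            simp only [List.map_cons, List.sum_cons] at hmu
            omega
          rw [ih (PySem.Set.union cb nc) (nc ++ rest) hnd' hre' hmu']
          -- the two reachable sets coincide
          congr 1
          have hsets : ({y | y ∈ PySem.Set.union cb nc}
                ∪ {y | ∃ t' ∈ nc ++ rest, Relation.TransGen (fun a b => b ∈ nAdj d a) t' y} : Set String)
              = ({y | y ∈ cb}
                ∪ {y | ∃ t' ∈ t :: rest, Relation.TransGen (fun a b => b ∈ nAdj d a) t' y} : Set String) := by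
            ext y
            simp only [Set.mem_union, Set.mem_setOf_eq, PySem.Set.mem_union, List.mem_append,
              List.mem_cons]
            constructor
            · rintro ((hy | hy) | ⟨t', (ht' | ht'), hT⟩)
              · exact Or.inl hy
              · exact Or.inr ⟨t, Or.inl rfl, Relation.TransGen.single (hncadj ▸ hy)⟩
              · exact Or.inr ⟨t, Or.inl rfl, Relation.TransGen.head (hncadj ▸ ht') hT⟩
              · exact Or.inr ⟨t', Or.inr ht', hT⟩
            · rintro (hy | ⟨t', (rfl | ht'), hT⟩)
              · exact Or.inl (Or.inl hy)
              · rcases Relation.TransGen.head'_iff.mp hT with ⟨b, hb, hby⟩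
                rcases Relation.reflTransGen_iff_eq_or_transGen.mp hby with rfl | hT2
                · exact Or.inl (Or.inr (hncadj ▸ hb))
                · exact Or.inr ⟨b, Or.inl (hedge' b hb), hT2⟩
              · exact Or.inr ⟨t', Or.inr ht', hT⟩
          rw [hsets]

-- ===== VERDICT (by name: the statement is the Claim_ definition above) =====
theorem calculate_maximum_containers_spec : Claim_equal_calculate_maximum_containers := by
  unfold Claim_equal_calculate_maximum_containers
  intro rules target _ hpre
  unfold Spec_calculate_maximum_containers
  have hkeysnd : (pyDictOf rules).keys.Nodup := PySem.Dict.nodup_keys_ofList _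
  have hin : ∀ p ∈ (pyDictOf rules).items, p.2.keys.Nodup := fun _ hp => pyDictOf_inner_nodup hp
  have hA := fun t => aInv_getD (pyDictOf rules) hin hkeysnd t
  have hB := fun t => bInv_getD (pyDictOf rules) hin t
  have hreachStar : ∀ x y, y ∈ reachStar rules x ↔
      Relation.ReflTransGen (fun a b => b ∈ nAdj (pyDictOf rules) a) x y :=
    fun x y => reachStar_iff rules x y
  have hacyc : ∀ y, Relation.ReflTransGen (fun a b => b ∈ nAdj (pyDictOf rules) a) target y →
      ¬ Relation.TransGen (fun a b => b ∈ nAdj (pyDictOf rules) a) y y := by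
    intro y hy hT
    rcases Relation.TransGen.head'_iff.mp hT with ⟨b, hb, hby⟩
    exact hpre y ((hreachStar target y).mpr hy) b hb ((hreachStar b y).mpr hby)
  -- the value A computes
  have hAval : calculate_maximum_containers rules target
      = (({y | Relation.TransGen (fun a b => b ∈ nAdj (pyDictOf rules) a) target y} : Set String).ncard : Int) := by
    show aLoop (create_inverse_map_A (pyDictOf rules))
        (((pyDictOf rules).size + 2) ^ ((pyDictOf rules).size + 2)) PySem.Set.empty [target] = _
    rw [aLoop_spec (pyDictOf rules) hA target hacyc
      (((pyDictOf rules).size + 2) ^ ((pyDictOf rules).size + 2)) PySem.Set.empty [target]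
      List.nodup_nil
      (by intro t ht; rcases List.mem_singleton.mp ht with rfl; exact Relation.ReflTransGen.refl)
      (by
        simp only [List.map_cons, List.map_nil, List.sum_cons, List.sum_nil, Nat.add_zero]
        exact Nat.pow_lt_pow_right (by omega) (by have := rnk_le (pyDictOf rules) target; omega))]
    congr 1
    have h1 : ({y | y ∈ PySem.Set.empty} : Set String) = ∅ := by
      ext y; simp [PySem.Set.empty]
    have h2 : ({y | ∃ t ∈ [target], Relation.TransGen (fun a b => b ∈ nAdj (pyDictOf rules) a) t y} : Set String)
        = {y | Relation.TransGen (fun a b => b ∈ nAdj (pyDictOf rules) a) target y} := by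
      ext y; simp
    rw [h1, h2, Set.empty_union]
  -- the value B computes
  have hBval : calculate_maximum_containers_alt rules target
      = (({y | Relation.TransGen (fun a b => b ∈ nAdj (pyDictOf rules) a) target y} : Set String).ncard : Int) := by
    show (PySem.Set.len (bLoop (bInv (pyDictOf rules))
        (PySem.Set.add PySem.Set.empty target) [target]) : Int) - 1 = _
    rw [bLoop_eq_nReach (bInv (pyDictOf rules)) (PySem.Set.add PySem.Set.empty target) [target]]
    have hadjB : ∀ t c, c ∈ (bInv (pyDictOf rules)).getD t []
        → c ∈ (bInv (pyDictOf rules)).values.flatten := fun _ _ hc => bInv_getD_mem_flatten hc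
    have hmem : ∀ y, y ∈ nReach (fun t => (bInv (pyDictOf rules)).getD t [])
        (bInv (pyDictOf rules)).values.flatten (PySem.Set.add PySem.Set.empty target) [target]
        ↔ Relation.ReflTransGen (fun a b => b ∈ nAdj (pyDictOf rules) a) target y := by
      intro y
      rw [nReach_spec _ _ hadjB target y]
      simp only [hB]
    have hnodup : (nReach (fun t => (bInv (pyDictOf rules)).getD t [])
        (bInv (pyDictOf rules)).values.flatten (PySem.Set.add PySem.Set.empty target) [target]).Nodup :=
      nReach_nodup _ _ _ _ (by simp)
    have hlen : (nReach (fun t => (bInv (pyDictOf rules)).getD t [])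
        (bInv (pyDictOf rules)).values.flatten (PySem.Set.add PySem.Set.empty target) [target]).length
        = ({y | Relation.ReflTransGen (fun a b => b ∈ nAdj (pyDictOf rules) a) target y} : Set String).ncard := by
      rw [len_eq_ncard _ hnodup]
      congr 1
      ext y
      simpa using hmem y
    have hinsert : ({y | Relation.ReflTransGen (fun a b => b ∈ nAdj (pyDictOf rules) a) target y} : Set String)
        = insert target {y | Relation.TransGen (fun a b => b ∈ nAdj (pyDictOf rules) a) target y} := by
      ext y
      simp only [Set.mem_setOf_eq, Set.mem_insert_iff]
      exact Relation.reflTransGen_iff_eq_or_transGen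
    have hnotmem : target ∉ ({y | Relation.TransGen (fun a b => b ∈ nAdj (pyDictOf rules) a) target y} : Set String) :=
      hacyc target Relation.ReflTransGen.refl
    have hcard : ({y | Relation.ReflTransGen (fun a b => b ∈ nAdj (pyDictOf rules) a) target y} : Set String).ncard
        = ({y | Relation.TransGen (fun a b => b ∈ nAdj (pyDictOf rules) a) target y} : Set String).ncard + 1 := by
      rw [hinsert, Set.ncard_insert_of_notMem hnotmem (reachPlus_finite (pyDictOf rules) target)]
    have : PySem.Set.len (nReach (fun t => (bInv (pyDictOf rules)).getD t [])
        (bInv (pyDictOf rules)).values.flatten (PySem.Set.add PySem.Set.empty target) [target])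
        = ((({y | Relation.TransGen (fun a b => b ∈ nAdj (pyDictOf rules) a) target y} : Set String).ncard + 1 : Nat) : Int) := by
      show ((nReach (fun t => (bInv (pyDictOf rules)).getD t [])
        (bInv (pyDictOf rules)).values.flatten (PySem.Set.add PySem.Set.empty target) [target]).length : Int) = _
      rw [hlen, hcard]
    rw [this]
    push_cast
    ring
  rw [hAval, hBval]
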